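-- pv_equiv track=rewrite | github.com/KevinMehrabi/rialwatch | scripts/uae_signal_watchlist.py | infer_signal_type
-- ===== SOURCE A (Python) =====
-- from typing import Any, Dict, List
--
-- def infer_signal_type(candidate_records: List[Dict[str, str]]) -> str:
--     currencies = {row.get("currency", "") for row in candidate_records}
--     has_remittance = any(str(row.get("remittance_quote_detected", "")).lower() == "true" for row in candidate_records)
--     if "AED" in currencies and "USD" in currencies:
--         return "website_rate_board"
--     if has_remittance:
--         return "remittance_quote"
--     if "USD" in currencies or "AED" in currencies:
--         return "numeric_quote_page"
--     return "stale_public_signal"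
-- ===== SOURCE B (Python) =====
-- from typing import Any, Dict, List
--
-- # 3-bit mask: bit0 = AED seen, bit1 = USD seen, bit2 = remittance quote seen.
-- # The table encodes the full priority cascade once, for all 8 masks.
-- _SIGNAL_TABLE = [
--     "stale_public_signal",   # 0b000
--     "numeric_quote_page",    # 0b001 AED only
--     "numeric_quote_page",    # 0b010 USD only
--     "website_rate_board",    # 0b011 AED+USD
--     "remittance_quote",      # 0b100 remittance only
--     "remittance_quote",      # 0b101 remittance+AED
--     "remittance_quote",      # 0b110 remittance+USD
--     "website_rate_board",    # 0b111 all
-- ]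
--
-- def _row_mask(row):
--     currency = row.get("currency", "")
--     mask = 0
--     if currency == "AED":
--         mask |= 1
--     if currency == "USD":
--         mask |= 2
--     if str(row.get("remittance_quote_detected", "")).lower() == "true":
--         mask |= 4
--     return mask
--
-- def infer_signal_type(candidate_records: List[Dict[str, str]]) -> str:
--     mask = 0
--     for row in candidate_records:
--         mask |= _row_mask(row)
--     return _SIGNAL_TABLE[mask]
-- ===== Notes on version B (the rewrite author's own statement) =====
-- stated objective: alternative
-- what changed: Replaces the materialized currency set, the separate any() scan and the four-branch priority cascade with a per-record 3-bit mask OR-reduced over the records and a single 8-entry lookup table indexed by the combined mask.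
import Mathlib
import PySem

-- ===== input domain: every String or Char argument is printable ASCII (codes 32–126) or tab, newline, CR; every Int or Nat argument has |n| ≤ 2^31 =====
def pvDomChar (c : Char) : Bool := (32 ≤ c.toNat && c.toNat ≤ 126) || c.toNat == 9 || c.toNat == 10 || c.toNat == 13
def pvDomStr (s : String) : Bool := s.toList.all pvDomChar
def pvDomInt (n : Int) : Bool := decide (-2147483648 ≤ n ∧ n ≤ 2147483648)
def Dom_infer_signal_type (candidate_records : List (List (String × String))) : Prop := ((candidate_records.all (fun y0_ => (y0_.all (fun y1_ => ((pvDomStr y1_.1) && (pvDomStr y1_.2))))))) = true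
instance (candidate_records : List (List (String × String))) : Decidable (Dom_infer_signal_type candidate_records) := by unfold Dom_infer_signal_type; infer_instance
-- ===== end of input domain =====

-- B replaces A's set + any() + branch cascade with a per-record 3-bit mask OR-reduced
-- over the records and an 8-entry lookup table. Objective: alternative decomposition.

-- ===== PORT A =====
-- row.get(k, "") on a dict (association list, first match)
def pvRowGet (row : List (String × String)) (k : String) : String :=
  PySem.Dict.getD (PySem.Dict.mk row) k ""

def infer_signal_type (candidate_records : List (List (String × String))) : String :=
  let currencies : PySem.Set String :=
    PySem.Set.ofList (candidate_records.map (fun row => pvRowGet row "currency"))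
  let has_remittance : Bool :=
    candidate_records.any (fun row =>
      PySem.Str.lower (pvRowGet row "remittance_quote_detected") == "true")
  if PySem.Set.contains currencies "AED" && PySem.Set.contains currencies "USD" then
    "website_rate_board"
  else if has_remittance then
    "remittance_quote"
  else if PySem.Set.contains currencies "USD" || PySem.Set.contains currencies "AED" then
    "numeric_quote_page"
  else
    "stale_public_signal"

-- ===== PORT B =====
def pvSignalTable : List String :=
  ["stale_public_signal", "numeric_quote_page", "numeric_quote_page", "website_rate_board",
   "remittance_quote", "remittance_quote", "remittance_quote", "website_rate_board"]

def pvRowMask (row : List (String × String)) : Nat :=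
  let currency := pvRowGet row "currency"
  let mask : Nat := 0
  let mask := if currency == "AED" then mask ||| 1 else mask
  let mask := if currency == "USD" then mask ||| 2 else mask
  let mask := if PySem.Str.lower (pvRowGet row "remittance_quote_detected") == "true"
              then mask ||| 4 else mask
  mask

def infer_signal_type_alt (candidate_records : List (List (String × String))) : String :=
  let mask : Nat := candidate_records.foldl (fun m row => m ||| pvRowMask row) 0
  pvSignalTable.getD mask ""

-- ===== PRECONDITION & SPEC =====
def Spec_infer_signal_type (candidate_records : List (List (String × String))) (out : String) : Prop := out = infer_signal_type_alt candidate_records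
instance (candidate_records : List (List (String × String))) (out : String) : Decidable (Spec_infer_signal_type candidate_records out) := by unfold Spec_infer_signal_type; infer_instance

-- ===== CLAIM (what is proved, stated in full; the proofs are below) =====
def Claim_equal_infer_signal_type : Prop := ∀ (candidate_records : List (List (String × String))), Dom_infer_signal_type candidate_records → Spec_infer_signal_type candidate_records (infer_signal_type candidate_records)

-- ===== LEMMAS AND PROOFS =====

def pvBit (b : Bool) : Nat := if b then 1 else 0

-- the per-row mask is the three flags packed into bits 0,1,2
theorem rowMask_eq (row : List (String × String)) :
    pvRowMask row
      = pvBit (pvRowGet row "currency" == "AED")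
        + 2 * pvBit (pvRowGet row "currency" == "USD")
        + 4 * pvBit (PySem.Str.lower (pvRowGet row "remittance_quote_detected") == "true") := by
  unfold pvRowMask pvBit
  by_cases hA : (pvRowGet row "currency" == "AED") = true <;>
    by_cases hU : (pvRowGet row "currency" == "USD") = true <;>
      by_cases hR : (PySem.Str.lower (pvRowGet row "remittance_quote_detected") == "true") = true <;>
        simp [hA, hU, hR]

-- OR of two packed masks packs the disjunctions
theorem packed_or (a u r x y z : Bool) :
    (pvBit a + 2 * pvBit u + 4 * pvBit r) ||| (pvBit x + 2 * pvBit y + 4 * pvBit z)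
      = pvBit (a || x) + 2 * pvBit (u || y) + 4 * pvBit (r || z) := by
  cases a <;> cases u <;> cases r <;> cases x <;> cases y <;> cases z <;> decide

-- B's OR-fold computes the three 'any' scans, packed
theorem foldl_mask (crs : List (List (String × String))) (a u r : Bool) :
    crs.foldl (fun m row => m ||| pvRowMask row)
        (pvBit a + 2 * pvBit u + 4 * pvBit r)
      = pvBit (a || crs.any (fun row => pvRowGet row "currency" == "AED"))
        + 2 * pvBit (u || crs.any (fun row => pvRowGet row "currency" == "USD"))
        + 4 * pvBit (r || crs.any (fun row =>
              PySem.Str.lower (pvRowGet row "remittance_quote_detected") == "true")) := by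
  induction crs generalizing a u r with
  | nil => simp
  | cons row rest ih =>
    rw [List.foldl_cons, rowMask_eq, packed_or, ih]
    simp [List.any_cons, Bool.or_assoc]

-- membership in A's currency set is B's 'any' flag
theorem contains_currencies (crs : List (List (String × String))) (c : String) :
    PySem.Set.contains (PySem.Set.ofList (crs.map (fun row => pvRowGet row "currency"))) c
      = crs.any (fun row => pvRowGet row "currency" == c) := by
  rw [Bool.eq_iff_iff]
  simp only [PySem.Set.contains_eq_listContains, List.contains_iff_mem,
    PySem.Set.mem_ofList, List.mem_map, List.any_eq_true, beq_iff_eq]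

-- ===== VERDICT (by name: the statement is the Claim_ definition above) =====
theorem infer_signal_type_spec : Claim_equal_infer_signal_type := by
  intro crs _
  unfold Spec_infer_signal_type infer_signal_type infer_signal_type_alt
  have h0 : (0 : Nat) = pvBit false + 2 * pvBit false + 4 * pvBit false := by decide
  rw [h0, foldl_mask]
  simp only [contains_currencies, Bool.false_or]
  by_cases hA : (crs.any (fun row => pvRowGet row "currency" == "AED")) = true <;>
    by_cases hU : (crs.any (fun row => pvRowGet row "currency" == "USD")) = true <;>
      by_cases hR : (crs.any (fun row =>
          PySem.Str.lower (pvRowGet row "remittance_quote_detected") == "true")) = true <;>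
        simp [hA, hU, hR, pvBit, pvSignalTable]
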